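-- pv_equiv track=rewrite | github.com/koteximshiashvili/GOA-homework | day 148/classwork/task2.py | func
-- ===== SOURCE A (Python) =====
-- def func(n):
--     count = 0
--     while n >= 10:
--         num = 1
--         for digit in str(n):
--             num *= int(digit)
--         n = num
--         count += 1
--     return count
-- ===== SOURCE B (Python) =====
-- def func(n):
--     # recursive persistence: digit product computed arithmetically (no string conversion)
--     if n < 10:
--         return 0
--     p = 1
--     m = n
--     while m > 0:
--         p *= m % 10
--         m //= 10
--     return 1 + func(p)
-- ===== Notes on version B (the rewrite author's own statement) =====
-- stated objective: alternative
-- what changed: Replaces the while-loop-with-counter over str(n) digit products by direct recursion on the digit product, computed arithmetically with % and // instead of string conversion.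
import Mathlib
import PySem

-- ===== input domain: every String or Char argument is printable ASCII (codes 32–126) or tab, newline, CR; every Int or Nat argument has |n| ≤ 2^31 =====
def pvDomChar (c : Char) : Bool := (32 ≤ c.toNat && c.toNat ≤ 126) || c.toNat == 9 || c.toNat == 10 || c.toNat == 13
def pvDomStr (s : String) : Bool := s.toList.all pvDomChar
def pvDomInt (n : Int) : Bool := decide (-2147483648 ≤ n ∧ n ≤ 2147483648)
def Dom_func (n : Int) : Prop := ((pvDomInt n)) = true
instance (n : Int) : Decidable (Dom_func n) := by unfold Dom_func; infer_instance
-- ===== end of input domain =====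

-- B replaces A's counting while-loop over str(n) digit products by direct recursion on the
-- arithmetic (% / //) digit product; same return value, structurally different decomposition.


-- ===== PORT A =====
-- while n >= 10: num = 1; for digit in str(n): num *= int(digit); n = num; count += 1
-- (fuel = n.toNat + 1 only makes the loop total; funcLoopA_fuel_eq below proves it is never
--  exhausted, so each call computes exactly what A's while loop computes.
--  int(digit) never raises: str(n) is all digits on the n ≥ 10 branch, hence the .getD 0.)
def funcLoopA (fuel : Nat) (n : Int) (count : Int) : Int :=
  match fuel with
  | 0 => count
  | f + 1 =>
    if n ≥ 10 then
      funcLoopA f ((PySem.Int.toChars n).foldl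
        (fun num d => num * (PySem.Int.ofChars? [d]).getD 0) 1) (count + 1)
    else count

def func (n : Int) : Int := funcLoopA (n.toNat + 1) n 0

-- ===== PORT B =====
-- B's inner while-loop: while m > 0: p *= m % 10; m //= 10   (fuel = m.toNat + 1, never exhausted)
def digitProdLoop (fuel : Nat) (p : Int) (m : Int) : Int :=
  match fuel with
  | 0 => p
  | f + 1 =>
    if 0 < m then digitProdLoop f (p * PySem.Int.mod m 10) (PySem.Int.floordiv m 10) else p

-- if n < 10: return 0; else return 1 + func(digit product of n)
def funcAltGo (fuel : Nat) (n : Int) : Int :=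
  match fuel with
  | 0 => 0
  | f + 1 =>
    if n < 10 then 0
    else 1 + funcAltGo f (digitProdLoop (n.toNat + 1) 1 n)

def func_alt (n : Int) : Int := funcAltGo (n.toNat + 1) n

-- ===== PRECONDITION & SPEC =====
def Spec_func (n : Int) (out : Int) : Prop := out = func_alt n
instance (n : Int) (out : Int) : Decidable (Spec_func n out) := by unfold Spec_func; infer_instance

-- ===== CLAIM (what is proved, stated in full; the proofs are below) =====
def Claim_equal_func : Prop := ∀ (n : Int), Dom_func n → Spec_func n (func n)

-- ===== LEMMAS AND PROOFS =====

-- Proof-side digit product on Nat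
def natProd (m : Nat) : Nat :=
  if _h : m < 10 then m else natProd (m / 10) * (m % 10)
decreasing_by exact Nat.div_lt_self (by omega) (by omega)

theorem natProd_le (m : Nat) : natProd m ≤ m := by
  induction m using Nat.strong_induction_on with
  | _ m ih =>
    unfold natProd
    split
    · omega
    · rename_i h
      have h1 : natProd (m / 10) ≤ m / 10 := ih _ (Nat.div_lt_self (by omega) (by omega))
      have h2 : m % 10 ≤ 9 := by omega
      calc natProd (m / 10) * (m % 10) ≤ (m / 10) * 9 := Nat.mul_le_mul h1 h2
        _ ≤ m := by omega

theorem natProd_lt (m : Nat) (h : 10 ≤ m) : natProd m < m := by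
  unfold natProd
  split
  · omega
  · have h1 : natProd (m / 10) ≤ m / 10 := natProd_le _
    have h2 : m % 10 ≤ 9 := by omega
    calc natProd (m / 10) * (m % 10) ≤ (m / 10) * 9 := Nat.mul_le_mul h1 h2
      _ < m := by omega

-- int(digit) of a single decimal digit character
theorem digitVal_eq (d : Nat) (h : d < 10) :
    (PySem.Int.ofChars? [Nat.digitChar d]).getD 0 = (d : Int) := by
  interval_cases d <;> decide

-- A's inner for-loop over str(n): product of the digit characters
theorem foldA_eq (m : Nat) :
    ∀ (a : Int), (Nat.toDigits 10 m).foldl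
      (fun num d => num * (PySem.Int.ofChars? [d]).getD 0) a = a * (natProd m : Int) := by
  induction m using Nat.strong_induction_on with
  | _ m ih =>
    intro a
    by_cases h : m < 10
    · rw [Nat.toDigits_of_lt_base h]
      simp [List.foldl, digitVal_eq m h, natProd, h]
    · rw [Nat.toDigits_of_base_le (by omega) (by omega), List.foldl_append]
      rw [ih (m / 10) (Nat.div_lt_self (by omega) (by omega))]
      simp only [List.foldl, digitVal_eq (m % 10) (by omega)]
      conv_rhs => rw [natProd, dif_neg h]
      push_cast
      ring

theorem toChars_fold_eq (n : Int) (h : 10 ≤ n) :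
    ((PySem.Int.toChars n).foldl
      (fun num d => num * (PySem.Int.ofChars? [d]).getD 0) 1) = (natProd n.toNat : Int) := by
  unfold PySem.Int.toChars
  rw [if_neg (by omega)]
  rw [foldA_eq]
  ring

-- B's while-loop computes the same digit product (fuel > m suffices)
theorem digitProdLoop_eq (fuel : Nat) : ∀ (m : Nat), 0 < m → m < fuel → ∀ (p : Int),
    digitProdLoop fuel p (m : Int) = p * (natProd m : Int) := by
  induction fuel with
  | zero => omega
  | succ f ih =>
    intro m hm hf p
    rw [digitProdLoop]
    rw [if_pos (by exact_mod_cast hm)]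
    have hmod : PySem.Int.mod (m : Int) 10 = ((m % 10 : Nat) : Int) := by
      simp [PySem.Int.mod, Int.fmod_eq_emod]
    have hdiv : PySem.Int.floordiv (m : Int) 10 = ((m / 10 : Nat) : Int) := by
      simp [PySem.Int.floordiv, Int.fdiv_eq_ediv]
    rw [hmod, hdiv]
    by_cases h : m < 10
    · have h10 : m / 10 = 0 := by omega
      have hm10 : m % 10 = m := by omega
      rw [h10, hm10]
      have hz : ∀ (g : Nat) (q : Int), digitProdLoop g q ((0 : Nat) : Int) = q := by
        intro g q; cases g <;> simp [digitProdLoop]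
      rw [hz]
      rw [natProd]; simp [h]
    · have hlt : m / 10 < m := Nat.div_lt_self (by omega) (by omega)
      rw [ih (m / 10) (by omega) (by omega)]
      conv_rhs => rw [natProd, dif_neg h]
      push_cast
      ring

-- proof-side persistence count
def persist (n : Int) : Int :=
  if _h : n < 10 then 0 else 1 + persist ((natProd n.toNat : Nat) : Int)
termination_by n.toNat
decreasing_by
  simp only [Int.toNat_natCast]
  exact Nat.lt_of_lt_of_le (natProd_lt n.toNat (by omega)) (by omega)

theorem funcAltGo_eq (fuel : Nat) : ∀ (n : Int), n.toNat < fuel → funcAltGo fuel n = persist n := by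
  induction fuel with
  | zero => omega
  | succ f ih =>
    intro n hf
    rw [funcAltGo, persist]
    by_cases h : n < 10
    · simp [h]
    · rw [if_neg h, dif_neg h]
      have hn : (n.toNat : Int) = n := Int.toNat_of_nonneg (by omega)
      have hd : digitProdLoop (n.toNat + 1) 1 n = (natProd n.toNat : Int) := by
        conv_lhs => rw [show n = (n.toNat : Int) from hn.symm]
        simp only [Int.toNat_natCast]
        rw [digitProdLoop_eq (n.toNat + 1) n.toNat (by omega) (by omega), one_mul]
      rw [hd, ih _ (by simpa using Nat.lt_of_lt_of_le (natProd_lt n.toNat (by omega)) (by omega))]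

theorem funcLoopA_eq (fuel : Nat) : ∀ (n : Int), n.toNat < fuel → ∀ (count : Int),
    funcLoopA fuel n count = count + persist n := by
  induction fuel with
  | zero => omega
  | succ f ih =>
    intro n hf count
    rw [funcLoopA, persist]
    by_cases h : n ≥ 10
    · rw [if_pos h, dif_neg (by omega)]
      rw [toChars_fold_eq n h]
      rw [ih _ (by simpa using Nat.lt_of_lt_of_le (natProd_lt n.toNat (by omega)) (by omega))]
      ring
    · rw [if_neg h, dif_pos (by omega)]
      ring

-- ===== VERDICT (by name: the statement is the Claim_ definition above) =====
theorem func_spec : Claim_equal_func := by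
  intro n _
  unfold Spec_func func func_alt
  rw [funcLoopA_eq (n.toNat + 1) n (by omega) 0,
    funcAltGo_eq (n.toNat + 1) n (by omega)]
  ring
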